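-- pv_equiv track=rewrite | github.com/finite-simple-group-of-order-two/Random-stuff-I-ve-been-working-on | different kinds of numbers/Munchausen.py | munchausen
-- ===== SOURCE A (Python) =====
-- def munchausen(num):
--     a=str(num)
--     omega=0
--     for x in a:
--         z=pow(int(x), int(x))
--         if(int(x)==0):
--             z=0
--         omega=omega+z
--     if omega==int(num):
--         return True
--     else:
--         return False
-- ===== SOURCE B (Python) =====
-- def munchausen(num):
--     n = int(num)
--     omega = 0
--     m = n
--     while m > 0:
--         d = m % 10
--         omega += 0 if d == 0 else d ** d
--         m //= 10
--     return omega == n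
-- ===== Notes on version B (the rewrite author's own statement) =====
-- stated objective: alternative
-- what changed: B extracts the digits arithmetically with modulo and floor division in a while loop instead of converting the number to a string and parsing each character back with int(), so no string is built at all.
import Mathlib
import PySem

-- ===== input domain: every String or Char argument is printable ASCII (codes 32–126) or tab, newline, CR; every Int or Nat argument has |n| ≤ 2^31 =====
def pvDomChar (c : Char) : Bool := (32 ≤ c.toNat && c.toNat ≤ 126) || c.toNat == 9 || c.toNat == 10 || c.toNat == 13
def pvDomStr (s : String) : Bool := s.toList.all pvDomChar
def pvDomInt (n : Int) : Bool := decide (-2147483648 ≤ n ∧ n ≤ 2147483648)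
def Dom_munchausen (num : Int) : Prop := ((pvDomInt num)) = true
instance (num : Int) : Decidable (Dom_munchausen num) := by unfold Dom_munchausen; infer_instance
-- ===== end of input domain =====

-- B replaces A's string conversion and per-character int() parsing by pure arithmetic digit
-- extraction with modulo and floor division (objective: alternative — no string is built at all).

-- ===== PORT A =====
-- int(x) for a single character x, exact per Python (none = ValueError)
def pvIntChar? (x : Char) : Option Int := PySem.Int.ofChars? [x]

def munchausen (num : Int) : Bool :=
  let a := PySem.Int.toChars num          -- a = str(num)
  -- omega accumulator; none marks the point where Python's int(x) raised ValueError
  let omega : Option Int := a.foldl (fun acc x =>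
    match acc, pvIntChar? x with
    | some w, some d =>
        let z := d ^ d.toNat              -- z = pow(int(x), int(x)); exponent nonneg since d is a digit value
        let z := if d == 0 then 0 else z  -- if int(x)==0: z=0
        some (w + z)                      -- omega = omega + z
    | _, _ => none) (some 0)
  match omega with
  | some w => decide (w = num)            -- int(num) = num; return True/False
  | none => false                         -- Python raised here (outside Pre_)

-- ===== PORT B =====
-- the while loop, fuel-counted (fuel = num.toNat bounds the iteration count; exact semantics):
-- while m > 0: d = m % 10; omega += 0 if d == 0 else d ** d; m //= 10
def munchLoop : Nat → Int → Int → Int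
  | 0, _, omega => omega
  | f + 1, m, omega =>
    if 0 < m then
      let d := PySem.Int.mod m 10
      munchLoop f (PySem.Int.floordiv m 10) (omega + if d == 0 then 0 else d ^ d.toNat)
    else omega

def munchausen_alt (num : Int) : Bool :=
  let n := num                            -- n = int(num)
  decide (munchLoop n.toNat n 0 = n)      -- omega accumulated by the loop; return omega == n

-- ===== PRECONDITION & SPEC =====
-- Pre_ excludes negative num, on which Python's int('-') raises ValueError.
def Pre_munchausen (num : Int) : Prop := 0 ≤ num
instance (num : Int) : Decidable (Pre_munchausen num) := by unfold Pre_munchausen; infer_instance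
def pvWitness_munchausen : Int := 3435

def Spec_munchausen (num : Int) (out : Bool) : Prop := out = munchausen_alt num
instance (num : Int) (out : Bool) : Decidable (Spec_munchausen num out) := by unfold Spec_munchausen; infer_instance

-- ===== CLAIM (what is proved, stated in full; the proofs are below) =====
def Claim_equal_munchausen : Prop := ∀ (num : Int), Dom_munchausen num → Pre_munchausen num → Spec_munchausen num (munchausen num)

-- ===== LEMMAS AND PROOFS =====

-- the digit contribution, as an integer, indexed by the digit value
def pvTermN (d : Nat) : Int := if d = 0 then 0 else (d : Int) ^ d

-- the per-character contribution of A's loop, as an Option (none where int(x) raises)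
def pvTerm? (c : Char) : Option Int :=
  (pvIntChar? c).map (fun d => if d == 0 then 0 else d ^ d.toNat)

def pvTerm (c : Char) : Int := (pvTerm? c).getD 0

lemma pvTerm?_digitChar {d : Nat} (hd : d < 10) :
    pvTerm? (Nat.digitChar d) = some (pvTermN d) := by
  interval_cases d <;> decide

lemma foldA_none (l : List Char) :
    l.foldl (fun acc x =>
      match acc, pvIntChar? x with
      | some w, some d =>
          let z := d ^ d.toNat
          let z := if d == 0 then 0 else z
          some (w + z)
      | _, _ => none) (none : Option Int) = none := by
  induction l with
  | nil => rfl
  | cons c l ih => simpa using ih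

lemma foldA_eq (l : List Char) (a : Int) :
    l.foldl (fun acc x =>
      match acc, pvIntChar? x with
      | some w, some d =>
          let z := d ^ d.toNat
          let z := if d == 0 then 0 else z
          some (w + z)
      | _, _ => none) (some a) =
    if ∀ c ∈ l, (pvTerm? c).isSome then some (a + (l.map pvTerm).sum) else none := by
  induction l generalizing a with
  | nil => simp
  | cons c l ih =>
    by_cases hc : (pvTerm? c).isSome
    · obtain ⟨d, hd⟩ := Option.isSome_iff_exists.mp (by simpa [pvTerm?] using hc)
      have hterm : pvTerm c = if d == 0 then 0 else d ^ d.toNat := by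
        simp [pvTerm, pvTerm?, hd]
      simp only [List.foldl_cons, hd]
      rw [ih]
      by_cases hl : ∀ x ∈ l, (pvTerm? x).isSome
      · have hcons : ∀ x ∈ c :: l, (pvTerm? x).isSome := by
          intro x hx
          rcases List.mem_cons.mp hx with h | h
          · exact h ▸ hc
          · exact hl x h
        rw [if_pos hl, if_pos hcons]
        simp only [List.map_cons, List.sum_cons, hterm]
        rw [add_assoc]
      · have hcons : ¬ ∀ x ∈ c :: l, (pvTerm? x).isSome := by
          intro h; exact hl (fun x hx => h x (List.mem_cons_of_mem _ hx))
        rw [if_neg hl, if_neg hcons]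
    · have hnone : pvIntChar? c = none := by
        by_contra h
        exact hc (by simp [pvTerm?, Option.isSome_iff_exists]; exact Option.ne_none_iff_exists'.mp h)
      have hcons : ¬ ∀ x ∈ c :: l, (pvTerm? x).isSome := by
        intro h; exact hc (h c List.mem_cons_self)
      simp only [List.foldl_cons, hnone, foldA_none]
      rw [if_neg hcons]

-- Nat.toDigits is the base-10 digit list, most significant first
lemma toDigitsCore_eq (f : Nat) : ∀ (n : Nat) (ds : List Char), 0 < n → n < f →
    Nat.toDigitsCore 10 f n ds = ((Nat.digits 10 n).map Nat.digitChar).reverse ++ ds := by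
  induction f with
  | zero => intro n ds h1 h2; omega
  | succ f ih =>
    intro n ds h1 h2
    rw [Nat.digits_def' (by norm_num : 1 < 10) h1]
    by_cases hz : n / 10 = 0
    · have hn : n % 10 = n := Nat.mod_eq_of_lt (by omega)
      simp [Nat.toDigitsCore, hz]
    · have h01 : 0 < n / 10 := Nat.pos_of_ne_zero hz
      have hlt : n / 10 < f := lt_of_lt_of_le (Nat.div_lt_self h1 (by norm_num)) (by omega)
      simp only [Nat.toDigitsCore, hz, if_false]
      rw [ih (n / 10) _ h01 hlt]
      simp

lemma toDigits_eq (n : Nat) (h : 0 < n) :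
    Nat.toDigits 10 n = ((Nat.digits 10 n).map Nat.digitChar).reverse :=
  (toDigitsCore_eq (n + 1) n [] h (by omega)).trans (List.append_nil _)

-- B's loop computes the sum of pvTermN over the base-10 digits (fuel suffices when m ≤ f)
lemma munchLoop_eq (f : Nat) : ∀ (m : Nat) (omega : Int), m ≤ f →
    munchLoop f (m : Int) omega = omega + ((Nat.digits 10 m).map pvTermN).sum := by
  induction f with
  | zero =>
    intro m omega hm
    have : m = 0 := by omega
    subst this
    simp [munchLoop]
  | succ f ih =>
    intro m omega hm
    by_cases h : 0 < m
    · have hpos : (0 : Int) < (m : Int) := by exact_mod_cast h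
      rw [munchLoop, if_pos hpos]
      have hmod : PySem.Int.mod (m : Int) 10 = ((m % 10 : Nat) : Int) :=
        PySem.Int.mod_natCast m 10
      have hdiv : PySem.Int.floordiv (m : Int) 10 = ((m / 10 : Nat) : Int) :=
        PySem.Int.floordiv_natCast m 10
      have hle : m / 10 ≤ f := by
        have := Nat.div_lt_self h (by norm_num : 1 < 10)
        omega
      rw [hmod, hdiv, ih (m / 10) _ hle,
        Nat.digits_def' (by norm_num : 1 < 10) h]
      have hterm : (if ((m % 10 : Nat) : Int) == 0 then (0 : Int)
          else ((m % 10 : Nat) : Int) ^ ((m % 10 : Nat) : Int).toNat) = pvTermN (m % 10) := by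
        simp only [pvTermN, beq_iff_eq, Int.toNat_natCast, Nat.cast_eq_zero]
      rw [hterm]
      simp only [List.map_cons, List.sum_cons]
      ring
    · have : m = 0 := by omega
      subst this
      simp [munchLoop]

-- A's character list for a nonnegative number, as digit values
lemma sum_pvTerm_toChars (n : Nat) :
    (∀ c ∈ PySem.Int.toChars (n : Int), (pvTerm? c).isSome) ∧
    ((PySem.Int.toChars (n : Int)).map pvTerm).sum = ((Nat.digits 10 n).map pvTermN).sum := by
  have hchars : PySem.Int.toChars (n : Int) = Nat.toDigits 10 n := by
    simp [PySem.Int.toChars, Int.toNat_natCast, not_lt.mpr (Int.natCast_nonneg n)]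
  by_cases h : 0 < n
  · rw [hchars, toDigits_eq n h]
    constructor
    · intro c hc
      simp only [List.mem_reverse, List.mem_map] at hc
      obtain ⟨d, hd, rfl⟩ := hc
      rw [pvTerm?_digitChar (Nat.digits_lt_base (by norm_num) hd)]
      rfl
    · rw [List.map_reverse, List.sum_reverse, List.map_map]
      congr 1
      apply List.map_congr_left
      intro d hd
      simp [Function.comp, pvTerm, pvTerm?_digitChar (Nat.digits_lt_base (by norm_num) hd)]
  · have : n = 0 := by omega
    subst this
    rw [hchars]
    have h0 : Nat.toDigits 10 0 = [Nat.digitChar 0] := rfl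
    have ht := pvTerm?_digitChar (show (0 : Nat) < 10 by norm_num)
    rw [h0]
    refine ⟨?_, ?_⟩
    · intro c hc
      simp only [List.mem_singleton] at hc
      subst hc
      simp [ht]
    · simp [pvTerm, ht, pvTermN]

-- ===== VERDICT (by name: the statement is the Claim_ definition above) =====
theorem munchausen_spec : Claim_equal_munchausen := by
  intro num _ hpre
  unfold Spec_munchausen
  obtain ⟨n, rfl⟩ := Int.eq_ofNat_of_zero_le hpre
  simp only [munchausen, munchausen_alt]
  rw [foldA_eq, munchLoop_eq _ n 0 (by simp [Int.toNat_natCast])]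
  obtain ⟨hall, hsum⟩ := sum_pvTerm_toChars n
  rw [if_pos hall]
  simp only [zero_add, hsum]
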